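-- pv_equiv track=rewrite | github.com/yesi07111/computer_networks_fall_2024 | code/client.py | decode_chunked_body
-- ===== SOURCE A (Python) =====
-- def decode_chunked_body(lines):
--     body = ''
--     trailers = []
--     index = 0
--     while index < len(lines):
--         chunk_size_str = lines[index].strip()
--         try:
--             chunk_size = int(chunk_size_str.split(';')[0], 16)
--         except ValueError:
--             raise Exception('Invalid chunk size')
--         if chunk_size == 0:
--             index += 1
--             break
--         index += 1
--         body += '\r\n'.join(lines[index:index+chunk_size])
--         index += chunk_size + 1
--
--     # Leer trailers
--     while index < len(lines) and lines[index] != '':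
--         trailer_line = lines[index]
--         if ':' in trailer_line:
--             key, value = trailer_line.split(':', 1)
--             trailers.append((key.strip(), value.strip()))
--         index += 1
--
--     return body, trailers
-- ===== SOURCE B (Python) =====
-- def decode_chunked_body(lines):
--     # Single line-by-line pass with a small state machine instead of slice-and-jump indexing.
--     body = ''
--     trailers = []
--     phase = 0          # 0: expect chunk size, 1: chunk data, 2: skip separator, 3: trailers, 4: done
--     remaining = 0
--     first = True
--     for line in lines:
--         if phase == 0:
--             try:
--                 n = int(line.strip().split(';')[0], 16)
--             except ValueError:
--                 raise Exception('Invalid chunk size')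
--             if n == 0:
--                 phase = 3
--             else:
--                 remaining, first, phase = n, True, 1
--         elif phase == 1:
--             body += line if first else '\r\n' + line
--             first = False
--             remaining -= 1
--             if remaining == 0:
--                 phase = 2
--         elif phase == 2:
--             phase = 0
--         elif phase == 3:
--             if line == '':
--                 phase = 4
--             elif ':' in line:
--                 key, value = line.split(':', 1)
--                 trailers.append((key.strip(), value.strip()))
--     return body, trailers
-- ===== Notes on version B (the rewrite author's own statement) =====
-- stated objective: alternative
-- what changed: Replaces A's slice-and-jump index arithmetic (while-loop over an index with list slicing and '\r\n'.join) by a single line-by-line pass with a small state machine (phases: chunk-size / chunk-data with a remaining counter / skip-separator / trailers / done).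
-- outside the precondition, e.g. on decode_chunked_body(['-1', '0']): A returns ('', []), B returns ('0', [])
import Mathlib
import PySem

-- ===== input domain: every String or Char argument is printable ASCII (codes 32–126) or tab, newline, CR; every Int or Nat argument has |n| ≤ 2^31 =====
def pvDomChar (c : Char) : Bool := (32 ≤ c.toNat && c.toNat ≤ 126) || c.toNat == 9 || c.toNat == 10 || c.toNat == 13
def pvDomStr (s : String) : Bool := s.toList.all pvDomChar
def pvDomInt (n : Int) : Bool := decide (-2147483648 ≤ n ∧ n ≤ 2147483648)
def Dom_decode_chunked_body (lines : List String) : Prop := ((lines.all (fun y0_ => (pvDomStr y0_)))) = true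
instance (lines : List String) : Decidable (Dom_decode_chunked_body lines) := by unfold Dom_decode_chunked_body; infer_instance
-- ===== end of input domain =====

-- B replaces A's slice-and-jump index arithmetic by a single line-by-line pass with a
-- small state machine (phases: size / data / skip / trailers / done); objective: alternative decomposition.


-- shared by both ports: both Pythons contain the identical expression int(line.strip().split(';')[0], 16)
def pvParseChunkSize (line : String) : Option Int :=
  match PySem.Str.split? (PySem.Str.strip line) ";" with
  | some (p :: _) => PySem.Int.ofStrBase? p 16
  | _ => none

-- ===== PORT A =====
-- the body while-loop; fuel only totalizes (index strictly grows inside Pre_); returns (index, body)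
def pvLoopA (lines : List String) : Nat → Int → String → Int × String
  | 0, index, body => (index, body)
  | fuel+1, index, body =>
    if index < (lines.length : Int) then
      match PySem.List.pyGet? lines index with
      | none => (index, body)  -- IndexError (unreachable inside Pre_)
      | some line =>
        match pvParseChunkSize line with
        | none => (index, body)  -- Python: raise Exception('Invalid chunk size'); outside Pre_
        | some chunk_size =>
          if chunk_size = 0 then (index + 1, body)
          else
            pvLoopA lines fuel ((index + 1) + (chunk_size + 1))
              (body ++ PySem.Str.join "\r\n"
                 (PySem.List.slice lines (some (index + 1)) (some ((index + 1) + chunk_size))))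
    else (index, body)

-- the trailer while-loop
def pvLoopT (lines : List String) : Nat → Int → List (String × String) → List (String × String)
  | 0, _, trailers => trailers
  | fuel+1, index, trailers =>
    if index < (lines.length : Int) then
      match PySem.List.pyGet? lines index with
      | none => trailers  -- IndexError (unreachable inside Pre_)
      | some line =>
        if line = "" then trailers
        else
          pvLoopT lines fuel (index + 1)
            (if PySem.Str.isIn ":" line then
               match PySem.Str.splitMax? line ":" 1 with
               | some (k :: v :: _) => trailers ++ [(PySem.Str.strip k, PySem.Str.strip v)]
               | _ => trailers
             else trailers)
    else trailers

def decode_chunked_body (lines : List String) : String × (List (String × String)) :=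
  let r := pvLoopA lines (lines.length + 1) 0 ""
  (r.2, pvLoopT lines (lines.length + 1) r.1 [])

-- ===== PORT B =====
-- one pass over the lines; phase 0 = expect chunk size, 1 = chunk data, 2 = skip separator line,
-- 3 = trailers, 4 = done
def pvStepB : List String → Nat → Int → Bool → String → List (String × String) → String × List (String × String)
  | [], _, _, _, body, trailers => (body, trailers)
  | line :: rest, phase, remaining, first, body, trailers =>
    if phase = 0 then
      match pvParseChunkSize line with
      | none => (body, trailers)  -- Python: raise Exception('Invalid chunk size'); outside Pre_
      | some n =>
        if n = 0 then pvStepB rest 3 remaining first body trailers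
        else pvStepB rest 1 n true body trailers
    else if phase = 1 then
      pvStepB rest (if remaining - 1 = 0 then 2 else 1) (remaining - 1) false
        (if first then body ++ line else body ++ ("\r\n" ++ line)) trailers
    else if phase = 2 then
      pvStepB rest 0 remaining first body trailers
    else if phase = 3 then
      if line = "" then pvStepB rest 4 remaining first body trailers
      else
        pvStepB rest 3 remaining first body
          (if PySem.Str.isIn ":" line then
             match PySem.Str.splitMax? line ":" 1 with
             | some (k :: v :: _) => trailers ++ [(PySem.Str.strip k, PySem.Str.strip v)]
             | _ => trailers
           else trailers)
    else pvStepB rest 4 remaining first body trailers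

def decode_chunked_body_alt (lines : List String) : String × (List (String × String)) :=
  pvStepB lines 0 0 true "" []

-- ===== PRECONDITION & SPEC =====
-- Pre_ admits exactly the well-formed chunked inputs: every chunk-size line parses as hex and is
-- nonnegative.  On a failed parse A raises Exception('Invalid chunk size'); on a negative size A's
-- slice-and-jump arithmetic may rewind the index and diverge, and where it happens to return (size -1)
-- both A's value and B's are accidents of their loop shapes on malformed input, so those are excluded.
-- state: 0 = at a chunk-size line, k+1 = k+1 data/separator lines still to skip
def pvPreChunks : List String → Nat → Bool
  | [], _ => true
  | line :: rest, 0 =>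
    (match pvParseChunkSize line with
     | none => false
     | some n => if 0 < n then pvPreChunks rest (n.toNat + 1) else n == 0)
  | _ :: rest, k+1 => pvPreChunks rest k

def Pre_decode_chunked_body (lines : List String) : Prop := pvPreChunks lines 0 = true
instance (lines : List String) : Decidable (Pre_decode_chunked_body lines) := by unfold Pre_decode_chunked_body; infer_instance

def pvWitness_decode_chunked_body : List String :=
  ["2", "hello", "world", "", "0", "X-Check: ok", "Skipped", ""]

def Spec_decode_chunked_body (lines : List String) (out : String × (List (String × String))) : Prop := out = decode_chunked_body_alt lines
instance (lines : List String) (out : String × (List (String × String))) : Decidable (Spec_decode_chunked_body lines out) := by unfold Spec_decode_chunked_body; infer_instance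

-- ===== CLAIM (what is proved, stated in full; the proofs are below) =====
def Claim_equal_decode_chunked_body : Prop := ∀ (lines : List String), Dom_decode_chunked_body lines → Pre_decode_chunked_body lines → Spec_decode_chunked_body lines (decode_chunked_body lines)

-- ===== LEMMAS AND PROOFS =====

theorem pvStepB_phase2 (l : List String) (rem : Int) (first : Bool) (body : String)
    (tr : List (String × String)) :
    pvStepB l 2 rem first body tr = pvStepB (l.drop 1) 0 rem first body tr := by
  cases l with
  | nil => rfl
  | cons x xs => simp only [pvStepB, List.drop_succ_cons, List.drop_zero]; norm_num

theorem pvStepB_data_false (l : List String) (n : Int) (body : String)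
    (tr : List (String × String)) (hn : 0 < n) :
    pvStepB l 1 n false body tr =
      pvStepB (l.drop (n.toNat + 1)) 0 0 false
        ((l.take n.toNat).foldl (fun a x => a ++ ("\r\n" ++ x)) body) tr := by
  induction l generalizing n body with
  | nil => simp only [pvStepB, List.drop_nil, List.take_nil, List.foldl_nil]
  | cons x xs ih =>
    rcases eq_or_ne (n - 1) 0 with h1 | h1
    · have hn1 : n = 1 := by omega
      subst hn1
      have step : pvStepB (x :: xs) 1 1 false body tr
          = pvStepB xs 2 0 false (body ++ ("\r\n" ++ x)) tr := by
        simp only [pvStepB]; norm_num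
      rw [step, pvStepB_phase2]
      norm_num [List.drop_succ_cons]
    · have step : pvStepB (x :: xs) 1 n false body tr
          = pvStepB xs 1 (n - 1) false (body ++ ("\r\n" ++ x)) tr := by
        simp only [pvStepB, h1]; norm_num
      have ht : n.toNat = (n - 1).toNat + 1 := by omega
      rw [step, ih (n - 1) _ (by omega), ht]
      simp only [List.drop_succ_cons, List.take_succ_cons, List.foldl_cons]

theorem pv_fold_join (pieces : List String) (x body : String) :
    pieces.foldl (fun a y => a ++ ("\r\n" ++ y)) (body ++ x) =
      body ++ PySem.Str.join "\r\n" (x :: pieces) := by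
  induction pieces generalizing x body with
  | nil =>
    simp only [List.foldl_nil, PySem.Str.join, List.map_cons, List.map_nil,
      PySem.Chars.join_singleton, String.ofList_toList]
  | cons y ys ih =>
    have hj : PySem.Str.join "\r\n" (x :: y :: ys)
        = x ++ ("\r\n" ++ PySem.Str.join "\r\n" (y :: ys)) := by
      simp only [PySem.Str.join, List.map_cons, PySem.Chars.join_cons_cons, List.append_assoc,
        String.ofList_append, String.ofList_toList]
    rw [List.foldl_cons, hj]
    have h2 := ih y (body ++ (x ++ "\r\n"))
    simp only [String.append_assoc] at h2 ⊢
    exact h2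

theorem pvStepB_data (l : List String) (n : Int) (body : String)
    (tr : List (String × String)) (hn : 0 < n) :
    pvStepB l 1 n true body tr =
      pvStepB (l.drop (n.toNat + 1)) 0 0 false
        (body ++ PySem.Str.join "\r\n" (l.take n.toNat)) tr := by
  cases l with
  | nil =>
    simp only [pvStepB, List.drop_nil, List.take_nil, PySem.Str.join, List.map_nil,
      PySem.Chars.join_nil, String.ofList_nil, String.append_empty]
  | cons x xs =>
    rcases eq_or_ne (n - 1) 0 with h1 | h1
    · have hn1 : n = 1 := by omega
      subst hn1
      have step : pvStepB (x :: xs) 1 1 true body tr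
          = pvStepB xs 2 0 false (body ++ x) tr := by
        simp only [pvStepB]; norm_num
      rw [step, pvStepB_phase2]
      norm_num [List.drop_succ_cons, PySem.Str.join, PySem.Chars.join_singleton]
    · have step : pvStepB (x :: xs) 1 n true body tr
          = pvStepB xs 1 (n - 1) false (body ++ x) tr := by
        simp only [pvStepB, h1]; norm_num
      have ht : n.toNat = (n - 1).toNat + 1 := by omega
      rw [step, pvStepB_data_false xs (n - 1) _ tr (by omega), pv_fold_join, ht]
      simp only [List.drop_succ_cons, List.take_succ_cons]
theorem pvStepB_phase4 (l : List String) (rem : Int) (first : Bool) (body : String)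
    (tr : List (String × String)) : pvStepB l 4 rem first body tr = (body, tr) := by
  induction l with
  | nil => rfl
  | cons x xs ih => simp only [pvStepB]; norm_num; exact ih

theorem pv_get_of_drop (lines : List String) (i : Int) (line : String) (rest : List String)
    (hi : 0 ≤ i) (hdrop : lines.drop i.toNat = line :: rest) :
    PySem.List.pyGet? lines i = some line := by
  rw [show i = ((i.toNat : Nat) : Int) from (Int.toNat_of_nonneg hi).symm,
    PySem.List.pyGet?_natCast]
  have h : (lines.drop i.toNat)[0]? = lines[i.toNat + 0]? := List.getElem?_drop
  rw [hdrop] at h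
  simpa using h.symm

theorem pv_trailer_eq (lines : List String) (fuel : Nat) (i : Int) (rem : Int) (first : Bool)
    (body : String) (tr : List (String × String)) (hi : 0 ≤ i)
    (hfuel : lines.length ≤ i.toNat + fuel) :
    pvStepB (lines.drop i.toNat) 3 rem first body tr = (body, pvLoopT lines fuel i tr) := by
  induction fuel generalizing i tr with
  | zero =>
    have hnil : lines.drop i.toNat = [] := List.drop_eq_nil_of_le (by omega)
    rw [hnil]
    rfl
  | succ fuel ih =>
    cases hdrop : lines.drop i.toNat with
    | nil =>
      have hlen : lines.length ≤ i.toNat := by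
        have := congrArg List.length hdrop
        simp only [List.length_drop, List.length_nil] at this
        omega
      have hnot : ¬ (i < (lines.length : Int)) := by omega
      simp only [pvLoopT, if_neg hnot, pvStepB]
    | cons line rest =>
      have hlt : i.toNat < lines.length := by
        have := congrArg List.length hdrop
        simp only [List.length_drop, List.length_cons] at this
        omega
      have hltI : i < (lines.length : Int) := by omega
      have hget := pv_get_of_drop lines i line rest hi hdrop
      have hrest : lines.drop (i + 1).toNat = rest := by
        have h1 : (i + 1).toNat = i.toNat + 1 := by omega
        rw [h1, ← List.tail_drop, hdrop, List.tail_cons]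
      by_cases hline : line = ""
      · subst hline
        simp only [pvLoopT, if_pos hltI, hget, pvStepB]
        norm_num [pvStepB_phase4]
      · have step : pvStepB (line :: rest) 3 rem first body tr
            = pvStepB rest 3 rem first body
                (if PySem.Str.isIn ":" line then
                   match PySem.Str.splitMax? line ":" 1 with
                   | some (k :: v :: _) => tr ++ [(PySem.Str.strip k, PySem.Str.strip v)]
                   | _ => tr
                 else tr) := by
          simp only [pvStepB, if_neg hline]; norm_num
        rw [step, ← hrest, ih (i + 1) _ (by omega) (by omega)]
        simp only [pvLoopT, if_pos hltI, hget, if_neg hline]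

theorem pvPreChunks_skip (l : List String) (k : Nat) :
    pvPreChunks l k = pvPreChunks (l.drop k) 0 := by
  induction l generalizing k with
  | nil => simp [pvPreChunks]
  | cons x xs ih =>
    cases k with
    | zero => rfl
    | succ k => simp only [pvPreChunks, List.drop_succ_cons]; exact ih k

theorem pv_main (lines : List String) (fuel : Nat) (i : Int) (rem : Int) (first : Bool)
    (body : String) (tr : List (String × String)) (hi : 0 ≤ i)
    (hfuel : lines.length ≤ i.toNat + fuel)
    (hpre : pvPreChunks (lines.drop i.toNat) 0 = true) :
    pvStepB (lines.drop i.toNat) 0 rem first body tr =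
      ((pvLoopA lines fuel i body).2,
        pvLoopT lines (lines.length + 1) (pvLoopA lines fuel i body).1 tr) := by
  induction fuel generalizing i rem first body tr with
  | zero =>
    have hnil : lines.drop i.toNat = [] := List.drop_eq_nil_of_le (by omega)
    have hnot : ¬ (i < (lines.length : Int)) := by omega
    rw [hnil]
    simp only [pvLoopA, pvStepB, pvLoopT, if_neg hnot]
  | succ fuel ih =>
    cases hdrop : lines.drop i.toNat with
    | nil =>
      have hnot : ¬ (i < (lines.length : Int)) := by
        have := congrArg List.length hdrop
        simp only [List.length_drop, List.length_nil] at this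
        omega
      simp only [pvStepB, pvLoopA, pvLoopT, if_neg hnot]
    | cons line rest =>
      have hlt : i.toNat < lines.length := by
        have := congrArg List.length hdrop
        simp only [List.length_drop, List.length_cons] at this
        omega
      have hltI : i < (lines.length : Int) := by omega
      have hget := pv_get_of_drop lines i line rest hi hdrop
      have hrest : lines.drop (i.toNat + 1) = rest := by
        rw [← List.tail_drop, hdrop, List.tail_cons]
      rw [hdrop] at hpre
      simp only [pvPreChunks] at hpre
      cases hp : pvParseChunkSize line with
      | none => rw [hp] at hpre; simp at hpre
      | some n =>
        rw [hp] at hpre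
        simp only at hpre
        by_cases hn : 0 < n
        · rw [if_pos hn, pvPreChunks_skip] at hpre
          have hne : ¬ (n = 0) := by omega
          have stepB : pvStepB (line :: rest) 0 rem first body tr
              = pvStepB rest 1 n true body tr := by
            simp only [pvStepB, hp, if_neg hne]; norm_num
          have stepA : pvLoopA lines (fuel + 1) i body
              = pvLoopA lines fuel ((i + 1) + (n + 1))
                  (body ++ PySem.Str.join "\r\n"
                    (PySem.List.slice lines (some (i + 1)) (some ((i + 1) + n)))) := by
            simp only [pvLoopA, if_pos hltI, hget, hp, if_neg hne]
          have hslice : PySem.List.slice lines (some (i + 1)) (some ((i + 1) + n))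
              = rest.take n.toNat := by
            rw [PySem.List.slice_toNat lines (by omega) (by omega)]
            have h2 : ((i + 1) + n).toNat - (i.toNat + 1) = n.toNat := by omega
            rw [show (i + 1).toNat = i.toNat + 1 by omega] at *
            rw [h2, hrest]
          have hdrop2 : lines.drop ((i + 1) + (n + 1)).toNat = rest.drop (n.toNat + 1) := by
            have h1 : ((i + 1) + (n + 1)).toNat = (i.toNat + 1) + (n.toNat + 1) := by omega
            rw [h1, ← List.drop_drop, hrest]
          rw [stepB, pvStepB_data rest n body tr hn, stepA, hslice, ← hdrop2,
            ih ((i + 1) + (n + 1)) 0 false _ tr (by omega) (by omega)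
              (by rw [hdrop2]; exact hpre)]
        · rw [if_neg hn] at hpre
          have hn0 : n = 0 := by
            have := of_decide_eq_true hpre
            omega
          subst hn0
          have stepB : pvStepB (line :: rest) 0 rem first body tr
              = pvStepB rest 3 rem first body tr := by
            simp only [pvStepB, hp]; norm_num
          have stepA : pvLoopA lines (fuel + 1) i body = (i + 1, body) := by
            simp only [pvLoopA, if_pos hltI, hget, hp]; norm_num
          have hrest' : lines.drop (i + 1).toNat = rest := by
            rw [show (i + 1).toNat = i.toNat + 1 by omega, hrest]
          rw [stepB, stepA, ← hrest',
            pv_trailer_eq lines (lines.length + 1) (i + 1) rem first body tr (by omega) (by omega)]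

-- ===== VERDICT (by name: the statement is the Claim_ definition above) =====
theorem decode_chunked_body_spec : Claim_equal_decode_chunked_body := by
  intro lines _ hpre
  unfold Spec_decode_chunked_body decode_chunked_body decode_chunked_body_alt
  have h := pv_main lines (lines.length + 1) 0 0 true "" [] (by omega) (by simp) (by simpa using hpre)
  simpa using h.symm
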